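-- pv_equiv track=rewrite | github.com/CompNet/SignedCentrality | src/util.py | generate_uniform_membership
-- ===== SOURCE A (Python) =====
-- import math
--
-- def generate_uniform_membership(n, l0):
--     """This method creates a membership data, where the size of the modules
--     as equal as possible, i.e. uniform distribution.
--
--     :param n: a list of number of nodes
--     :type n: int
--     :param l0: number of modules from which the underlying graph is created
--     :type l0: int
--     :param d: density
--     :type d: float
--     :param prop_mispl: proportion of misplaced links
--     :type prop_mispl: float
--     """
--     membership = []
--     nk = math.floor(n / l0)
--     module_sizes = [nk] * l0
--     nb_remaining = n - (nk * l0)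
--     for i in range(nb_remaining):
--         module_sizes[i] += 1
--     for i in range(l0):
--         membership.extend([i + 1] * module_sizes[i])
--     return membership
-- ===== SOURCE B (Python) =====
-- import math
--
-- def generate_uniform_membership(n, l0):
--     """Per-node closed form: node j belongs to module j//(nk+1)+1 inside the
--     first nb_remaining (larger) modules, else nb_remaining+(j-b)//nk+1."""
--     nk = math.floor(n / l0)
--     nb_remaining = n - nk * l0
--     b = nb_remaining * (nk + 1)
--     return [j // (nk + 1) + 1 if j < b
--             else nb_remaining + (j - b) // nk + 1
--             for j in range(n)]
-- ===== Notes on version B (the rewrite author's own statement) =====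
-- stated objective: alternative
-- what changed: B replaces A's module-sizes array (build, per-module increment loop, per-module extend) by a single pass over the node index space computing each node's module label in closed form by index arithmetic.
-- outside the precondition, e.g. on generate_uniform_membership(1, 0): A raises ZeroDivisionError, B raises ZeroDivisionError; on generate_uniform_membership(5, -2): A returns [], B returns [1, 0, 0, -1, -1]
import Mathlib
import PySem

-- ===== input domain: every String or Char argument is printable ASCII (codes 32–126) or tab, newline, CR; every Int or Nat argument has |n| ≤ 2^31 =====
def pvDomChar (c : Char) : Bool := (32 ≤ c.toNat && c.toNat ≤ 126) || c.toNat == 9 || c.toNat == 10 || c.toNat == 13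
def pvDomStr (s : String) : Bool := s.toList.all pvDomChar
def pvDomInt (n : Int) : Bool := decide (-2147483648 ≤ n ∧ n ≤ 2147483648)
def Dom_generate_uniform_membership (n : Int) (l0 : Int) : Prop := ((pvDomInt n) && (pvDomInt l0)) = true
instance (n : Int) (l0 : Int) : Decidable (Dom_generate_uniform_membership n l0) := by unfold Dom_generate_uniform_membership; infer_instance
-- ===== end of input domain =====

-- B computes each node's module label by index arithmetic in one pass over the node
-- index space, instead of A's module-sizes array with its increment loop and per-module extend.

-- ===== PORT A =====
def generate_uniform_membership (n : Int) (l0 : Int) : List Int :=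
  let nk := PySem.Int.floordiv n l0
  -- Python's list is an array: module_sizes is an Array so that the indexed
  -- accesses below are O(1) as in Python; all indices i come from range(...) and
  -- are in bounds under Pre_, where setIfInBounds/getD are exact for ms[i]
  let module_sizes := Array.replicate l0.toNat nk
  let nb_remaining := n - nk * l0
  let module_sizes :=
    (PySem.List.pyRange 0 nb_remaining 1).foldl
      (fun ms i => ms.setIfInBounds i.toNat (ms.getD i.toNat 0 + 1)) module_sizes
  (PySem.List.pyRange 0 l0 1).foldl
    (fun membership i =>
      membership ++ PySem.List.pyRepeat [i + 1] (module_sizes.getD i.toNat 0)) []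

-- ===== PORT B =====
def generate_uniform_membership_alt (n : Int) (l0 : Int) : List Int :=
  let nk := PySem.Int.floordiv n l0
  let nb_remaining := n - nk * l0
  let b := nb_remaining * (nk + 1)
  (PySem.List.pyRange 0 n 1).map (fun j =>
    if j < b then PySem.Int.floordiv j (nk + 1) + 1
    else nb_remaining + PySem.Int.floordiv (j - b) nk + 1)

-- ===== PRECONDITION & SPEC =====
-- Pre_ excludes l0 = 0, where A raises ZeroDivisionError, and the out-of-domain module
-- count l0 < 0 with n > 0, where A's empty list is an artefact of Python's negative list
-- multiplication while B's per-node arithmetic yields other labels.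
def Pre_generate_uniform_membership (n : Int) (l0 : Int) : Prop :=
  l0 ≠ 0 ∧ (0 < l0 ∨ n ≤ 0)
instance (n : Int) (l0 : Int) : Decidable (Pre_generate_uniform_membership n l0) := by
  unfold Pre_generate_uniform_membership; infer_instance
def pvWitness_generate_uniform_membership : Int × Int := (10, 4)
def Spec_generate_uniform_membership (n : Int) (l0 : Int) (out : List Int) : Prop := out = generate_uniform_membership_alt n l0
instance (n : Int) (l0 : Int) (out : List Int) : Decidable (Spec_generate_uniform_membership n l0 out) := by unfold Spec_generate_uniform_membership; infer_instance

-- ===== CLAIM (what is proved, stated in full; the proofs are below) =====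
def Claim_equal_generate_uniform_membership : Prop := ∀ (n : Int) (l0 : Int), Dom_generate_uniform_membership n l0 → Pre_generate_uniform_membership n l0 → Spec_generate_uniform_membership n l0 (generate_uniform_membership n l0)

-- ===== LEMMAS AND PROOFS =====

-- module sizes of A in closed form: the first r modules get nk+1 nodes, the rest nk
def pvSize (nk r : Int) (i : Int) : Int := if i < r then nk + 1 else nk
-- start index of module i in the flattened membership list
def pvPos (nk r : Int) (i : Int) : Int :=
  if i ≤ r then i * (nk + 1) else r * (nk + 1) + (i - r) * nk

theorem pvGetD_toArray (l : List Int) (i : Nat) (d : Int) :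
    (l.toArray).getD i d = l.getD i d := by
  simp only [Array.getD, List.size_toArray, List.getD]
  split
  · rename_i h; simp [List.getElem?_eq_getElem h]
  · rename_i h; simp [List.getElem?_eq_none (show l.length ≤ i by omega)]

theorem pvSizes_closed (nk : Int) (m L : Nat) (hm : m ≤ L) :
    (PySem.List.pyRange 0 (m : Int) 1).foldl
      (fun ms i => ms.setIfInBounds i.toNat (ms.getD i.toNat 0 + 1))
      (Array.replicate L nk)
    = (List.replicate m (nk + 1) ++ List.replicate (L - m) nk).toArray := by
  induction m with
  | zero =>
    rw [Array.replicate_eq_toArray_replicate]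
    simp [PySem.List.pyRange_one_eq_nil]
  | succ m ih =>
    rw [show ((m + 1 : Nat) : Int) = (m : Int) + 1 by push_cast; ring,
        PySem.List.pyRange_one_succ_right (by positivity), List.foldl_append,
        ih (by omega)]
    simp only [List.foldl_cons, List.foldl_nil, Int.toNat_natCast,
      List.setIfInBounds_toArray, pvGetD_toArray]
    have hcons : List.replicate (L - m) nk = nk :: List.replicate (L - (m + 1)) nk := by
      rw [show L - m = (L - (m + 1)) + 1 by omega]; rfl
    rw [hcons, show m = (List.replicate m (nk + 1)).length by simp]
    simp [List.getD, List.replicate_succ', List.append_assoc]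

-- A's membership list as a flatMap of constant blocks of the closed-form sizes
theorem pvA_flat (n l0 : Int) (hl0 : 0 < l0)
    (hr0 : 0 ≤ n - PySem.Int.floordiv n l0 * l0)
    (hrl : n - PySem.Int.floordiv n l0 * l0 < l0) :
    generate_uniform_membership n l0
    = (PySem.List.pyRange 0 l0 1).flatMap
        (fun i => List.replicate
          (pvSize (PySem.Int.floordiv n l0) (n - PySem.Int.floordiv n l0 * l0) i).toNat (i + 1)) := by
  show (PySem.List.pyRange 0 l0 1).foldl _ [] = _
  rw [show n - PySem.Int.floordiv n l0 * l0
      = (((n - PySem.Int.floordiv n l0 * l0).toNat : Int)) from (Int.toNat_of_nonneg hr0).symm,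
      pvSizes_closed (PySem.Int.floordiv n l0) (n - PySem.Int.floordiv n l0 * l0).toNat
        l0.toNat (by omega)]
  rw [PySem.List.foldl_append_eq_flatMap]
  rw [List.nil_append]
  apply List.flatMap_congr
  intro i hi
  rw [PySem.List.mem_pyRange_one] at hi
  set nk := PySem.Int.floordiv n l0
  set rt := (n - nk * l0).toNat with hrt
  have hlen : (List.replicate rt (nk + 1) ++ List.replicate (l0.toNat - rt) nk).length
      = l0.toNat := by simp; omega
  rw [pvGetD_toArray, List.getD_eq_getElem _ 0 (by rw [hlen]; omega)]
  rw [PySem.List.pyRepeat_singleton]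
  congr 1
  rw [List.getElem_append]
  simp only [List.length_replicate, List.getElem_replicate]
  rw [pvSize]
  split_ifs with h1 h2 h2 <;> first | rfl | (exfalso; omega)

theorem pvPos_succ (nk r i : Int) : pvPos nk r (i + 1) = pvPos nk r i + pvSize nk r i := by
  unfold pvPos pvSize
  split_ifs with h1 h2 h3 h2 h3 h3 h3
  all_goals try (exfalso; omega)
  · ring
  · have h : i = r := by omega
    subst h; ring
  · ring

theorem pvPos_zero (nk r : Int) (hr : 0 ≤ r) : pvPos nk r 0 = 0 := by
  rw [pvPos, if_pos hr]; ring

theorem pvPos_top (nk r l0 n : Int) (hrl : r < l0) (hn : n = nk * l0 + r) :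
    pvPos nk r l0 = n := by
  rw [pvPos, if_neg (by omega), hn]; ring

theorem pvPos_le (nk r l0 n i : Int) (hnk : 0 ≤ nk) (_hr : 0 ≤ r) (_hrl : r < l0)
    (hn : n = nk * l0 + r) (_hi : 0 ≤ i) (hil : i ≤ l0) : pvPos nk r i ≤ n := by
  rw [pvPos]; split_ifs with h <;> nlinarith

-- on module i's index block, B's label formula is constantly i+1
theorem pvLabel (nk r i j : Int) (hnk : 0 ≤ nk) (hr : 0 ≤ r) (_hi : 0 ≤ i)
    (h1 : pvPos nk r i ≤ j) (h2 : j < pvPos nk r (i + 1)) :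
    (if j < r * (nk + 1) then PySem.Int.floordiv j (nk + 1) + 1
     else r + PySem.Int.floordiv (j - r * (nk + 1)) nk + 1) = i + 1 := by
  by_cases hir : i < r
  · have hp1 : pvPos nk r i = i * (nk + 1) := by rw [pvPos, if_pos (by omega)]
    have hp2 : pvPos nk r (i + 1) = (i + 1) * (nk + 1) := by rw [pvPos, if_pos (by omega)]
    have hb : (i + 1) * (nk + 1) ≤ r * (nk + 1) := by nlinarith
    rw [hp1] at h1; rw [hp2] at h2
    rw [if_pos (by linarith)]
    rw [(PySem.Int.floordiv_eq_iff_of_pos (by omega)).mpr ⟨h1, h2⟩]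
  · have hp1 : pvPos nk r i = r * (nk + 1) + (i - r) * nk := by
      rw [pvPos]; split_ifs with h
      · have he : i = r := by omega
        subst he; ring
      · rfl
    have hp2 : pvPos nk r (i + 1) = r * (nk + 1) + (i + 1 - r) * nk := by
      rw [pvPos, if_neg (by omega)]
    have hge : 0 ≤ (i - r) * nk := by nlinarith
    rw [hp1] at h1; rw [hp2] at h2
    rw [if_neg (by linarith)]
    have hlow : (i - r) * nk ≤ j - r * (nk + 1) := by linarith
    have hhigh : j - r * (nk + 1) < (i - r + 1) * nk := by nlinarith
    have he : (i - r + 1) * nk = (i - r) * nk + nk := by ring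
    have hnkpos : 0 < nk := by linarith [he ▸ hhigh]
    rw [(PySem.Int.floordiv_eq_iff_of_pos hnkpos).mpr ⟨hlow, hhigh⟩]
    ring

theorem pvMapConst (f : Int → Int) (a c v : Int) (h : ∀ j, a ≤ j → j < c → f j = v) :
    (PySem.List.pyRange a c 1).map f = List.replicate (c - a).toNat v := by
  apply List.eq_replicate_iff.mpr
  refine ⟨by simp [PySem.List.length_pyRange_one], ?_⟩
  intro b hb
  rw [List.mem_map] at hb
  obtain ⟨j, hj, rfl⟩ := hb
  rw [PySem.List.mem_pyRange_one] at hj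
  exact h j hj.1 hj.2

-- main correspondence: B's per-node map over the remaining node indices equals
-- A's flatMap of constant blocks over the remaining modules
theorem pvMain (nk r l0 n : Int) (hnk : 0 ≤ nk) (hr : 0 ≤ r) (hrl : r < l0)
    (hn : n = nk * l0 + r) :
    ∀ (k : Nat) (i : Int), 0 ≤ i → i + k = l0 →
    (PySem.List.pyRange (pvPos nk r i) n 1).map
        (fun j => if j < r * (nk + 1) then PySem.Int.floordiv j (nk + 1) + 1
                  else r + PySem.Int.floordiv (j - r * (nk + 1)) nk + 1)
      = (PySem.List.pyRange i l0 1).flatMap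
          (fun i => List.replicate (pvSize nk r i).toNat (i + 1)) := by
  intro k
  induction k with
  | zero =>
    intro i hi hil
    have he : i = l0 := by omega
    rw [he, pvPos_top nk r l0 n hrl hn]
    simp [PySem.List.pyRange_one_eq_nil]
  | succ k ih =>
    intro i hi hil
    have hilt : i < l0 := by omega
    have hs := pvPos_succ nk r i
    have hsz : 0 ≤ pvSize nk r i := by rw [pvSize]; split_ifs <;> omega
    have hub : pvPos nk r (i + 1) ≤ n := pvPos_le nk r l0 n (i + 1) hnk hr hrl hn (by omega) (by omega)
    rw [PySem.List.pyRange_one_cons hilt, List.flatMap_cons,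
        PySem.List.pyRange_one_append (pvPos nk r i) (pvPos nk r (i + 1)) n (by omega) hub,
        List.map_append]
    congr 1
    · rw [pvMapConst _ _ _ (i + 1) (fun j hj1 hj2 => pvLabel nk r i j hnk hr hi hj1 hj2)]
      congr 1
      omega
    · exact ih (i + 1) (by omega) (by omega)

-- B with its lets unfolded (definitional)
theorem pvB_eq (n l0 : Int) :
    generate_uniform_membership_alt n l0
    = (PySem.List.pyRange 0 n 1).map
        (fun j => if j < (n - PySem.Int.floordiv n l0 * l0) * (PySem.Int.floordiv n l0 + 1)
            then PySem.Int.floordiv j (PySem.Int.floordiv n l0 + 1) + 1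
            else (n - PySem.Int.floordiv n l0 * l0)
              + PySem.Int.floordiv (j - (n - PySem.Int.floordiv n l0 * l0) * (PySem.Int.floordiv n l0 + 1)) (PySem.Int.floordiv n l0) + 1) := rfl

-- ===== VERDICT (by name: the statement is the Claim_ definition above) =====
theorem generate_uniform_membership_spec : Claim_equal_generate_uniform_membership := by
  intro n l0 _ hpre
  obtain ⟨hne, hcase⟩ := hpre
  show generate_uniform_membership n l0 = generate_uniform_membership_alt n l0
  by_cases hl0 : 0 < l0
  · have hmod := PySem.Int.floordiv_mul_add_mod n l0
    have hr0 : 0 ≤ n - PySem.Int.floordiv n l0 * l0 := by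
      have := PySem.Int.mod_nonneg n hl0; omega
    have hrl : n - PySem.Int.floordiv n l0 * l0 < l0 := by
      have := PySem.Int.mod_lt n hl0; omega
    rw [pvA_flat n l0 hl0 hr0 hrl, pvB_eq]
    by_cases hn : 0 ≤ n
    · have hnk : 0 ≤ PySem.Int.floordiv n l0 :=
        (PySem.Int.le_floordiv_iff_mul_le hl0).mpr (by omega)
      have hmain := pvMain (PySem.Int.floordiv n l0) (n - PySem.Int.floordiv n l0 * l0) l0 n
        hnk hr0 hrl (by ring) l0.toNat 0 le_rfl (by omega)
      rw [pvPos_zero _ _ hr0] at hmain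
      exact hmain.symm
    · have hnil : PySem.List.pyRange (0 : Int) n 1 = [] :=
        PySem.List.pyRange_one_eq_nil (by omega)
      rw [hnil, List.map_nil]
      apply List.flatMap_eq_nil_iff.mpr
      intro i hi
      have hnkneg : PySem.Int.floordiv n l0 < 0 :=
        (PySem.Int.floordiv_lt_iff_lt_mul hl0).mpr (by simpa using (by omega : n < 0))
      have hz : (pvSize (PySem.Int.floordiv n l0) (n - PySem.Int.floordiv n l0 * l0) i).toNat = 0 := by
        rw [pvSize]; split_ifs <;> omega
      rw [hz, List.replicate_zero]
  · have hn0 : n ≤ 0 := hcase.resolve_left hl0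
    simp [generate_uniform_membership, generate_uniform_membership_alt,
      PySem.List.pyRange_one_eq_nil (show l0 ≤ (0 : Int) by omega),
      PySem.List.pyRange_one_eq_nil (show n ≤ (0 : Int) by omega)]
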